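-- pv_equiv track=rewrite | github.com/starsdeep/Home-Depot-Product-Search-Relevance | utility.py | match_last_k_noun
-- ===== SOURCE A (Python) =====
-- def match_last_k_noun(s, tags, k, exact_matching=False):
--     """
--     total number of noun(s) which is both in s and last k noun(s) of str2(tags is pos_tag of str2)
--     :param str1:
--     :param tags:
--     :return: cnt
--     """
--     nouns, cnt = [], 0
--     for key, tag in reversed(tags):
--         if tag=='NN':
--             nouns.append(key)
--             if len(nouns)>=k:
--                 break
--     targets = s.split()
--     for noun in nouns:
--         if exact_matching and noun in targets:
--             cnt += 1
--         elif not exact_matching and s.find(noun)>=0: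
--             cnt += 1
--     return cnt
-- ===== SOURCE B (Python) =====
-- def match_last_k_noun(s, tags, k, exact_matching=False):
--     if k <= 0:
--         return 0
--     nouns = [key for key, tag in tags if tag == 'NN']
--     last_k = nouns[max(len(nouns) - k, 0):]
--     if exact_matching:
--         targets = set(s.split())
--         return sum(noun in targets for noun in last_k)
--     return sum(s.find(noun) >= 0 for noun in last_k)
-- ===== Notes on version B (the rewrite author's own statement) =====
-- stated objective: simpler
-- what changed: B replaces A's backward scan with early break plus a second counting loop by a forward filter of all NN keys, a tail slice nouns[max(len-k,0):], and a sum over that slice (comprehension-based, no reversed/break, set lookup for exact matching).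
-- intended difference: On k <= 0 with at least one NN tag whose last key matches s, A still collects that one noun (its break fires only after appending) and returns 1, while B returns 0, the intended count of the last zero nouns. — e.g. on match_last_k_noun("a", [("a", "NN")], 0, false): A returns 1, B returns 0
import Mathlib
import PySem

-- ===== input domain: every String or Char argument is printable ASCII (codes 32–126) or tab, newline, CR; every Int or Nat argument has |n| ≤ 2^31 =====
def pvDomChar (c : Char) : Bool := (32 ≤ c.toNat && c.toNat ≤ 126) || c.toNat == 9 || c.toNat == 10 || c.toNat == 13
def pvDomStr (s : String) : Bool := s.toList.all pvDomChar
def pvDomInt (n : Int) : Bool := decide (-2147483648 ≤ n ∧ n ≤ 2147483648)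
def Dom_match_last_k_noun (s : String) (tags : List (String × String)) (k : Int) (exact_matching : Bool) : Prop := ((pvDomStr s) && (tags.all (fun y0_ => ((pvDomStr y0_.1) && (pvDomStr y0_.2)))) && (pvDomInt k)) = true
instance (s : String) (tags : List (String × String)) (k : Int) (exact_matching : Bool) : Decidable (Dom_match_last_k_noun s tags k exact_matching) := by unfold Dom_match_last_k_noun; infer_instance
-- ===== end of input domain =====

-- B builds the forward list of NN keys, slices off its last-k tail and sums the matches
-- (objective: simpler); on k ≤ 0 B returns 0 where A still counts one noun (see D_ below).

-- ===== PORT A =====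
-- first loop of A: collect last-k nouns from reversed(tags)
def pvCollect (k : Int) : List (String × String) → List String → List String
  | [], nouns => nouns
  | (key, tag) :: rest, nouns =>
    if tag == "NN" then
      let nouns' := nouns ++ [key]
      if k ≤ (nouns'.length : Int) then nouns' else pvCollect k rest nouns'
    else pvCollect k rest nouns

-- second loop of A: count nouns matching s
def pvCountStep (s : String) (targets : List String) (exact_matching : Bool) (cnt : Int) (noun : String) : Int :=
  if exact_matching && targets.contains noun then cnt + 1
  else if !exact_matching && decide (0 ≤ PySem.Str.find s noun) then cnt + 1
  else cnt

def match_last_k_noun (s : String) (tags : List (String × String)) (k : Int) (exact_matching : Bool) : Int :=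
  let nouns := pvCollect k tags.reverse []
  let targets := PySem.Str.split₀ s
  nouns.foldl (pvCountStep s targets exact_matching) 0

-- ===== PORT B =====
def match_last_k_noun_alt (s : String) (tags : List (String × String)) (k : Int) (exact_matching : Bool) : Int :=
  if k ≤ 0 then 0
  else
    let nouns := (tags.filter (fun p => p.2 == "NN")).map Prod.fst
    -- nouns[max(len(nouns)-k, 0):] : slice with a nonnegative start index = drop (exact)
    let lastk := nouns.drop (max ((nouns.length : Int) - k) 0).toNat
    if exact_matching then
      let targets := PySem.Set.ofList (PySem.Str.split₀ s)
      -- sum(noun in targets for noun in last_k)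
      ((lastk.countP (fun noun => PySem.Set.contains targets noun)) : Int)
    else
      -- sum(s.find(noun) >= 0 for noun in last_k)
      ((lastk.countP (fun noun => decide (0 ≤ PySem.Str.find s noun))) : Int)

-- ===== PRECONDITION & SPEC =====
-- On k ≤ 0 with at least one NN tag whose last key matches s, A still collects that one
-- noun (its break fires only after appending) and returns 1, while B returns 0, the
-- intended count of the last zero nouns.
def D_match_last_k_noun (s : String) (tags : List (String × String)) (k : Int) (exact_matching : Bool) : Prop :=
  k ≤ 0 ∧ (((tags.filter (fun p => p.2 == "NN")).map Prod.fst).getLast?.any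
      (fun key => if exact_matching then (PySem.Str.split₀ s).contains key
                  else decide (0 ≤ PySem.Str.find s key))) = true
instance (s : String) (tags : List (String × String)) (k : Int) (exact_matching : Bool) : Decidable (D_match_last_k_noun s tags k exact_matching) := by unfold D_match_last_k_noun; infer_instance

def Spec_match_last_k_noun (s : String) (tags : List (String × String)) (k : Int) (exact_matching : Bool) (out : Int) : Prop := ¬ D_match_last_k_noun s tags k exact_matching → out = match_last_k_noun_alt s tags k exact_matching
instance (s : String) (tags : List (String × String)) (k : Int) (exact_matching : Bool) (out : Int) : Decidable (Spec_match_last_k_noun s tags k exact_matching out) := by unfold Spec_match_last_k_noun; infer_instance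

def pvDiffWitness_match_last_k_noun : String × (List (String × String)) × Int × Bool := ("a", [("a", "NN")], 0, false)
def pvDiffWitnessOut_match_last_k_noun : Int × Int := (1, 0)

-- ===== CLAIM (what is proved, stated in full; the proofs are below) =====
def Claim_unchanged_match_last_k_noun : Prop := ∀ (s : String) (tags : List (String × String)) (k : Int) (exact_matching : Bool), Dom_match_last_k_noun s tags k exact_matching → Spec_match_last_k_noun s tags k exact_matching (match_last_k_noun s tags k exact_matching)
def Claim_changed_match_last_k_noun : Prop := Dom_match_last_k_noun (pvDiffWitness_match_last_k_noun.1) (pvDiffWitness_match_last_k_noun.2.1) (pvDiffWitness_match_last_k_noun.2.2.1) (pvDiffWitness_match_last_k_noun.2.2.2) ∧ D_match_last_k_noun (pvDiffWitness_match_last_k_noun.1) (pvDiffWitness_match_last_k_noun.2.1) (pvDiffWitness_match_last_k_noun.2.2.1) (pvDiffWitness_match_last_k_noun.2.2.2) ∧ match_last_k_noun (pvDiffWitness_match_last_k_noun.1) (pvDiffWitness_match_last_k_noun.2.1) (pvDiffWitness_match_last_k_noun.2.2.1) (pvDiffWitness_match_last_k_noun.2.2.2) = pvDiffWitnessOut_match_last_k_noun.1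 ∧ match_last_k_noun_alt (pvDiffWitness_match_last_k_noun.1) (pvDiffWitness_match_last_k_noun.2.1) (pvDiffWitness_match_last_k_noun.2.2.1) (pvDiffWitness_match_last_k_noun.2.2.2) = pvDiffWitnessOut_match_last_k_noun.2 ∧ pvDiffWitnessOut_match_last_k_noun.1 ≠ pvDiffWitnessOut_match_last_k_noun.2
def Claim_exact_match_last_k_noun : Prop := ∀ (s : String) (tags : List (String × String)) (k : Int) (exact_matching : Bool), Dom_match_last_k_noun s tags k exact_matching → D_match_last_k_noun s tags k exact_matching → match_last_k_noun s tags k exact_matching ≠ match_last_k_noun_alt s tags k exact_matching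

-- ===== LEMMAS AND PROOFS =====

-- the combined match predicate both programs test
def pvP (s : String) (em : Bool) (noun : String) : Bool :=
  if em then (PySem.Str.split₀ s).contains noun else decide (0 ≤ PySem.Str.find s noun)

theorem pvCountStep_eq (s : String) (em : Bool) (cnt : Int) (n : String) :
    pvCountStep s (PySem.Str.split₀ s) em cnt n = cnt + (if pvP s em n then 1 else 0) := by
  cases em <;> simp [pvCountStep, pvP] <;> split_ifs <;> simp

theorem foldl_countStep (s : String) (em : Bool) (ns : List String) :
    ∀ cnt : Int, ns.foldl (pvCountStep s (PySem.Str.split₀ s) em) cnt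
      = cnt + (ns.countP (pvP s em) : Int) := by
  induction ns with
  | nil => intro cnt; simp
  | cons n rest ih =>
    intro cnt
    rw [List.foldl_cons, pvCountStep_eq, ih, List.countP_cons]
    split_ifs <;> simp <;> ring

-- characterisation of A's first loop, k ≥ 1
theorem pvCollect_take (k : Int) (l : List (String × String)) :
    ∀ nouns : List String, (nouns.length : Int) < k →
      pvCollect k l nouns
        = nouns ++ ((l.filter (fun p => p.2 == "NN")).map Prod.fst).take (k - nouns.length).toNat := by
  induction l with
  | nil => intro nouns _; simp [pvCollect]
  | cons p rest ih =>
    intro nouns h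
    obtain ⟨key, tag⟩ := p
    by_cases htag : tag = "NN"
    · subst htag
      by_cases hk : k ≤ (nouns.length : Int) + 1
      · have h1 : (k - (nouns.length : Int)).toNat = 1 := by omega
        simp [pvCollect, hk, h1]
      · have hlt : ((nouns ++ [key]).length : Int) < k := by simp; omega
        have hcond : ¬ k ≤ ((nouns ++ [key]).length : Int) := by
          simp only [List.length_append, List.length_cons, List.length_nil]
          push_cast; omega
        have hrec := ih (nouns ++ [key]) hlt
        simp only [List.length_append, List.length_cons, List.length_nil] at hrec
        push_cast at hrec
        have h2 : (k - (nouns.length : Int)).toNat = (k - ((nouns.length : Int) + 1)).toNat + 1 := by omega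
        simp only [pvCollect, beq_self_eq_true, if_true]
        rw [if_neg hcond, hrec]
        simp [h2, List.take_succ_cons]
    · have htag' : (tag == "NN") = false := by simp [htag]
      simp [pvCollect, htag', ih nouns h]

-- characterisation of A's first loop, k ≤ 0: exactly one noun is still collected
theorem pvCollect_nonpos (k : Int) (hk : k ≤ 0) (l : List (String × String)) :
    pvCollect k l [] = ((l.filter (fun p => p.2 == "NN")).map Prod.fst).take 1 := by
  induction l with
  | nil => simp [pvCollect]
  | cons p rest ih =>
    obtain ⟨key, tag⟩ := p
    by_cases htag : tag = "NN"
    · subst htag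
      have h1 : k ≤ (([] ++ [key] : List String).length : Int) := by simp; omega
      simp only [pvCollect, beq_self_eq_true, if_true]
      rw [if_pos h1]
      simp
    · have htag' : (tag == "NN") = false := by simp [htag]
      simp [pvCollect, htag', ih]

-- A's result as a countP over the last-k tail of the forward NN-key list (k ≥ 1)
theorem A_char (s : String) (tags : List (String × String)) (k : Int) (em : Bool) (hk : 0 < k) :
    match_last_k_noun s tags k em
      = ((((tags.filter (fun p => p.2 == "NN")).map Prod.fst).drop
            (((tags.filter (fun p => p.2 == "NN")).map Prod.fst).length - k.toNat)).countP (pvP s em) : Int) := by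
  unfold match_last_k_noun
  rw [pvCollect_take k tags.reverse [] (by simpa using hk), foldl_countStep]
  simp only [List.nil_append, Int.zero_add, List.length_nil, Int.natCast_zero, Int.sub_zero]
  congr 1
  rw [List.filter_reverse, List.map_reverse]
  rw [List.take_reverse, List.countP_reverse]

-- B's result as the same countP (k ≥ 1)
theorem B_char (s : String) (tags : List (String × String)) (k : Int) (em : Bool) (hk : 0 < k) :
    match_last_k_noun_alt s tags k em
      = ((((tags.filter (fun p => p.2 == "NN")).map Prod.fst).drop
            (((tags.filter (fun p => p.2 == "NN")).map Prod.fst).length - k.toNat)).countP (pvP s em) : Int) := by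
  unfold match_last_k_noun_alt
  rw [if_neg (by omega)]
  have hidx : (max ((((tags.filter (fun p => p.2 == "NN")).map Prod.fst).length : Int) - k) 0).toNat
      = ((tags.filter (fun p => p.2 == "NN")).map Prod.fst).length - k.toNat := by omega
  cases em
  · simp only [hidx, Bool.false_eq_true, if_false]
    congr 1
  · simp only [hidx, if_true]
    congr 1
    apply List.countP_congr; intro n _; simp [pvP, PySem.Set.contains]

-- ===== VERDICT (by name: the statement is the Claim_ definition above) =====
theorem match_last_k_noun_spec : Claim_unchanged_match_last_k_noun := by
  intro s tags k em _hdom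
  unfold Spec_match_last_k_noun
  intro hnd
  by_cases hk : k ≤ 0
  · -- ¬D_ with k ≤ 0: the last NN key (if any) does not match, so both sides are 0
    unfold match_last_k_noun match_last_k_noun_alt
    rw [if_pos hk, pvCollect_nonpos k hk, foldl_countStep]
    rw [List.filter_reverse, List.map_reverse]
    set nn := (tags.filter (fun p => p.2 == "NN")).map Prod.fst with hnn
    unfold D_match_last_k_noun at hnd
    simp only [not_and, ← hnn] at hnd
    have hnd' := hnd hk
    cases h : nn.getLast? with
    | none =>
      have : nn = [] := List.getLast?_eq_none_iff.mp h
      simp [this]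
    | some key =>
      have hrev : nn.reverse.take 1 = [key] := by
        have : nn.reverse.head? = some key := by rw [List.head?_reverse, h]
        cases hr : nn.reverse with
        | nil => simp [hr] at this
        | cons a t => simp [hr] at this; simp [this]
      rw [hrev]
      have hpk : pvP s em key = false := by
        rw [h] at hnd'
        simp only [Option.any_some] at hnd'
        unfold pvP
        cases em <;> simpa using hnd'
      simp [hpk]
  · rw [A_char s tags k em (by omega), B_char s tags k em (by omega)]

theorem match_last_k_noun_changed : Claim_changed_match_last_k_noun := by
  unfold Claim_changed_match_last_k_noun; decide

theorem match_last_k_noun_tight : Claim_exact_match_last_k_noun := by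
  intro s tags k em _ hd
  obtain ⟨hk, hmatch⟩ := hd
  unfold match_last_k_noun match_last_k_noun_alt
  rw [if_pos hk, pvCollect_nonpos k hk, foldl_countStep]
  rw [List.filter_reverse, List.map_reverse]
  set nn := (tags.filter (fun p => p.2 == "NN")).map Prod.fst with hnn
  cases h : nn.getLast? with
  | none => rw [h] at hmatch; simp at hmatch
  | some key =>
    have hrev : nn.reverse.take 1 = [key] := by
      have : nn.reverse.head? = some key := by rw [List.head?_reverse, h]
      cases hr : nn.reverse with
      | nil => simp [hr] at this
      | cons a t => simp [hr] at this; simp [this]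
    rw [hrev]
    have hpk : pvP s em key = true := by
      rw [h] at hmatch
      simp only [Option.any_some] at hmatch
      unfold pvP
      cases em <;> simpa using hmatch
    simp [hpk]
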